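-- pv_equiv track=rewrite | github.com/tsantosh7/hitl-tool | training/normalize_output2.py | categorise_defence_statement
-- ===== SOURCE A (Python) =====
-- from typing import Any, Dict, List, Optional, Callable
--
-- def categorise_defence_statement(x: Any) -> Any:
--     if not isinstance(x, str):
--         return None
--     s = x.strip().lower()
--     if any(term in s for term in ("denies", "denied", "denial", "does not admit", "did not admit", "denying")):
--         return "Offender denies offence"
--     if any(term in s for term in ("alibi", "elsewhere", "other location", "not present")):
--         return "Offender claims to have alibi"
--     if "no clothing found" in s:
--         return "No clothing found matching offender’s"
--     if "no recovery of stolen goods" in s: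
--         return "No recovery of stolen goods from offender"
--     if any(term in s for term in ("previous ruling", "previous court case", "previously acquitted", "autrefois acquit")):
--         return "Previous ruling in another court case"
--     if any(term in s for term in ("consistency", "consistent evidence", "consistent testimony")):
--         return "Consistency of offender evidence in court and at police interview"
--     if any(term in s for term in ("previous good character", "character references", "testimonials")):
--         return "Offender of previous good character"
--     if any(term in s for term in ("lack of dna", "no dna", "dna evidence not found")):
--         return "Lack of DNA evidence to support allegations"
--     if any(term in s for term in ("lack of medical", "no medical evidence", "insufficient medical")):
--         return "Lack of medical evidence to support allegations"
--     if any(term in s for term in ("not credible", "unreliable witness", "inconsistencies", "unreliable victim", "credibility questioned")):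
--         return "Victim is not credible/is unreliable"
--     if any(term in s for term in ("admissibility", "inadmissible", "unreliable evidence", "abuse of process")):
--         return "Question admissibility of some item of evidence"
--     if any(term in s for term in ("lesser offence", "admits lesser", "guilty to lesser", "limited role", "less culpable")):
--         return "Offender admits only to lesser offence"
--     if any(term in s for term in ("co-accused responsible", "blames co-defendant", "main offender")):
--         return "Offender states co-accused is responsible for main offence"
--     if any(term in s for term in ("left scene before", "left before", "left early")):
--         return "Offender argues he/she left scene before main offence committed"
--     if any(term in s for term in ("bad character evidence", "character evidence against co-accused")):
--         return "Offender uses bad character evidence against co-accused"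
--     if "cut-throat" in s:
--         return "Cut-throat defence"
--     if any(term in s for term in ("self-defence", "justified action", "lawful defence", "prevention of crime", "lawful excuse")):
--         return "Self-defence or Justified Action"
--     if any(term in s for term in ("mental health", "insanity", "diminished responsibility", "psychiatric", "psychological")):
--         return "Mental Health / Insanity"
--     if any(term in s for term in ("mistaken identification", "misidentified", "wrongly identified")):
--         return "Mistaken Identification"
--     if any(term in s for term in ("did not intend", "no intention", "unintentional", "not deliberate")):
--         return "Lack of Intention"
--     if any(term in s for term in ("expert report", "expert testimony", "expert witness", "experts", "expert")):
--         return "Expert Evidence"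
--     if any(term in s for term in ("no case to answer", "no evidence offered", "submission of no case")):
--         return "No Case to Answer"
--     if any(term in s for term in ("innocent association", "association innocent")):
--         return "Innocent Association"
--     if any(term in s for term in ("provocation", "victim aggression", "victim initiated")):
--         return "Victim Provocation or Aggression"
--     if any(term in s for term in ("documentary evidence", "documents submitted", "witness statements", "written records")):
--         return "Documentary Evidence"
--     return x
-- ===== SOURCE B (Python) =====
-- # B: flat keyword table + exhaustive minimum-priority scan (no early-exit branch chain).
-- FLAT = [
--     ('denies', 0, 'Offender denies offence'),
--     ('denied', 0, 'Offender denies offence'),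
--     ('denial', 0, 'Offender denies offence'),
--     ('does not admit', 0, 'Offender denies offence'),
--     ('did not admit', 0, 'Offender denies offence'),
--     ('denying', 0, 'Offender denies offence'),
--     ('alibi', 1, 'Offender claims to have alibi'),
--     ('elsewhere', 1, 'Offender claims to have alibi'),
--     ('other location', 1, 'Offender claims to have alibi'),
--     ('not present', 1, 'Offender claims to have alibi'),
--     ('no clothing found', 2, 'No clothing found matching offender’s'),
--     ('no recovery of stolen goods', 3, 'No recovery of stolen goods from offender'),
--     ('previous ruling', 4, 'Previous ruling in another court case'),
--     ('previous court case', 4, 'Previous ruling in another court case'),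
--     ('previously acquitted', 4, 'Previous ruling in another court case'),
--     ('autrefois acquit', 4, 'Previous ruling in another court case'),
--     ('consistency', 5, 'Consistency of offender evidence in court and at police interview'),
--     ('consistent evidence', 5, 'Consistency of offender evidence in court and at police interview'),
--     ('consistent testimony', 5, 'Consistency of offender evidence in court and at police interview'),
--     ('previous good character', 6, 'Offender of previous good character'),
--     ('character references', 6, 'Offender of previous good character'),
--     ('testimonials', 6, 'Offender of previous good character'),
--     ('lack of dna', 7, 'Lack of DNA evidence to support allegations'),
--     ('no dna', 7, 'Lack of DNA evidence to support allegations'),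
--     ('dna evidence not found', 7, 'Lack of DNA evidence to support allegations'),
--     ('lack of medical', 8, 'Lack of medical evidence to support allegations'),
--     ('no medical evidence', 8, 'Lack of medical evidence to support allegations'),
--     ('insufficient medical', 8, 'Lack of medical evidence to support allegations'),
--     ('not credible', 9, 'Victim is not credible/is unreliable'),
--     ('unreliable witness', 9, 'Victim is not credible/is unreliable'),
--     ('inconsistencies', 9, 'Victim is not credible/is unreliable'),
--     ('unreliable victim', 9, 'Victim is not credible/is unreliable'),
--     ('credibility questioned', 9, 'Victim is not credible/is unreliable'),
--     ('admissibility', 10, 'Question admissibility of some item of evidence'),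
--     ('inadmissible', 10, 'Question admissibility of some item of evidence'),
--     ('unreliable evidence', 10, 'Question admissibility of some item of evidence'),
--     ('abuse of process', 10, 'Question admissibility of some item of evidence'),
--     ('lesser offence', 11, 'Offender admits only to lesser offence'),
--     ('admits lesser', 11, 'Offender admits only to lesser offence'),
--     ('guilty to lesser', 11, 'Offender admits only to lesser offence'),
--     ('limited role', 11, 'Offender admits only to lesser offence'),
--     ('less culpable', 11, 'Offender admits only to lesser offence'),
--     ('co-accused responsible', 12, 'Offender states co-accused is responsible for main offence'),
--     ('blames co-defendant', 12, 'Offender states co-accused is responsible for main offence'),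
--     ('main offender', 12, 'Offender states co-accused is responsible for main offence'),
--     ('left scene before', 13, 'Offender argues he/she left scene before main offence committed'),
--     ('left before', 13, 'Offender argues he/she left scene before main offence committed'),
--     ('left early', 13, 'Offender argues he/she left scene before main offence committed'),
--     ('bad character evidence', 14, 'Offender uses bad character evidence against co-accused'),
--     ('character evidence against co-accused', 14, 'Offender uses bad character evidence against co-accused'),
--     ('cut-throat', 15, 'Cut-throat defence'),
--     ('self-defence', 16, 'Self-defence or Justified Action'),
--     ('justified action', 16, 'Self-defence or Justified Action'),
--     ('lawful defence', 16, 'Self-defence or Justified Action'),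
--     ('prevention of crime', 16, 'Self-defence or Justified Action'),
--     ('lawful excuse', 16, 'Self-defence or Justified Action'),
--     ('mental health', 17, 'Mental Health / Insanity'),
--     ('insanity', 17, 'Mental Health / Insanity'),
--     ('diminished responsibility', 17, 'Mental Health / Insanity'),
--     ('psychiatric', 17, 'Mental Health / Insanity'),
--     ('psychological', 17, 'Mental Health / Insanity'),
--     ('mistaken identification', 18, 'Mistaken Identification'),
--     ('misidentified', 18, 'Mistaken Identification'),
--     ('wrongly identified', 18, 'Mistaken Identification'),
--     ('did not intend', 19, 'Lack of Intention'),
--     ('no intention', 19, 'Lack of Intention'),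
--     ('unintentional', 19, 'Lack of Intention'),
--     ('not deliberate', 19, 'Lack of Intention'),
--     ('expert report', 20, 'Expert Evidence'),
--     ('expert testimony', 20, 'Expert Evidence'),
--     ('expert witness', 20, 'Expert Evidence'),
--     ('experts', 20, 'Expert Evidence'),
--     ('expert', 20, 'Expert Evidence'),
--     ('no case to answer', 21, 'No Case to Answer'),
--     ('no evidence offered', 21, 'No Case to Answer'),
--     ('submission of no case', 21, 'No Case to Answer'),
--     ('innocent association', 22, 'Innocent Association'),
--     ('association innocent', 22, 'Innocent Association'),
--     ('provocation', 23, 'Victim Provocation or Aggression'),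
--     ('victim aggression', 23, 'Victim Provocation or Aggression'),
--     ('victim initiated', 23, 'Victim Provocation or Aggression'),
--     ('documentary evidence', 24, 'Documentary Evidence'),
--     ('documents submitted', 24, 'Documentary Evidence'),
--     ('witness statements', 24, 'Documentary Evidence'),
--     ('written records', 24, 'Documentary Evidence'),
-- ]
--
-- def categorise_defence_statement(x):
--     if not isinstance(x, str):
--         return None
--     s = x.strip().lower()
--     best = None
--     for kw, prio, label in FLAT:
--         if kw in s and (best is None or prio < best[0]):
--             best = (prio, label)
--     return best[1] if best is not None else x
-- ===== Notes on version B (the rewrite author's own statement) =====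
-- stated objective: alternative
-- what changed: B flattens the 25 keyword groups into one flat (keyword, priority, label) table and makes a single exhaustive pass keeping the minimum-priority matching entry, instead of A's ordered early-exit if-chain of any() tests.
import Mathlib
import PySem

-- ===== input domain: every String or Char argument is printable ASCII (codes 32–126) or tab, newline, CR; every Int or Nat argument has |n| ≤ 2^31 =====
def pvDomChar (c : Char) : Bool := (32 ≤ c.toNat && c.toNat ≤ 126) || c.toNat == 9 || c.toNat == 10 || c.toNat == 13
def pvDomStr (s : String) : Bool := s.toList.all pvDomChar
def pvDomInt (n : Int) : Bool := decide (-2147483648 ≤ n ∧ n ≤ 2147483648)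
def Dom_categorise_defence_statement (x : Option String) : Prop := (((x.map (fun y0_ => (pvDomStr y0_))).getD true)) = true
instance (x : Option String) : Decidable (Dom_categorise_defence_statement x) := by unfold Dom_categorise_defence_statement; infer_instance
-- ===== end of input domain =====

-- B replaces A's early-exit if-chain with a flat keyword table scanned exhaustively for the
-- minimum-priority match (objective: alternative, same cost).
-- ===== PORT A =====
def categorise_defence_statement (x : Option String) : Option String :=
  match x with
  | none => none
  | some x =>
    let s := PySem.Str.lower (PySem.Str.strip x)
    if (["denies", "denied", "denial", "does not admit", "did not admit", "denying"] : List String).any (fun t => PySem.Str.isIn t s) then some "Offender denies offence" else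
    if (["alibi", "elsewhere", "other location", "not present"] : List String).any (fun t => PySem.Str.isIn t s) then some "Offender claims to have alibi" else
    if PySem.Str.isIn "no clothing found" s then some "No clothing found matching offender’s" else
    if PySem.Str.isIn "no recovery of stolen goods" s then some "No recovery of stolen goods from offender" else
    if (["previous ruling", "previous court case", "previously acquitted", "autrefois acquit"] : List String).any (fun t => PySem.Str.isIn t s) then some "Previous ruling in another court case" else
    if (["consistency", "consistent evidence", "consistent testimony"] : List String).any (fun t => PySem.Str.isIn t s) then some "Consistency of offender evidence in court and at police interview" else
    if (["previous good character", "character references", "testimonials"] : List String).any (fun t => PySem.Str.isIn t s) then some "Offender of previous good character" else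
    if (["lack of dna", "no dna", "dna evidence not found"] : List String).any (fun t => PySem.Str.isIn t s) then some "Lack of DNA evidence to support allegations" else
    if (["lack of medical", "no medical evidence", "insufficient medical"] : List String).any (fun t => PySem.Str.isIn t s) then some "Lack of medical evidence to support allegations" else
    if (["not credible", "unreliable witness", "inconsistencies", "unreliable victim", "credibility questioned"] : List String).any (fun t => PySem.Str.isIn t s) then some "Victim is not credible/is unreliable" else
    if (["admissibility", "inadmissible", "unreliable evidence", "abuse of process"] : List String).any (fun t => PySem.Str.isIn t s) then some "Question admissibility of some item of evidence" else
    if (["lesser offence", "admits lesser", "guilty to lesser", "limited role", "less culpable"] : List String).any (fun t => PySem.Str.isIn t s) then some "Offender admits only to lesser offence" else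
    if (["co-accused responsible", "blames co-defendant", "main offender"] : List String).any (fun t => PySem.Str.isIn t s) then some "Offender states co-accused is responsible for main offence" else
    if (["left scene before", "left before", "left early"] : List String).any (fun t => PySem.Str.isIn t s) then some "Offender argues he/she left scene before main offence committed" else
    if (["bad character evidence", "character evidence against co-accused"] : List String).any (fun t => PySem.Str.isIn t s) then some "Offender uses bad character evidence against co-accused" else
    if PySem.Str.isIn "cut-throat" s then some "Cut-throat defence" else
    if (["self-defence", "justified action", "lawful defence", "prevention of crime", "lawful excuse"] : List String).any (fun t => PySem.Str.isIn t s) then some "Self-defence or Justified Action" else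
    if (["mental health", "insanity", "diminished responsibility", "psychiatric", "psychological"] : List String).any (fun t => PySem.Str.isIn t s) then some "Mental Health / Insanity" else
    if (["mistaken identification", "misidentified", "wrongly identified"] : List String).any (fun t => PySem.Str.isIn t s) then some "Mistaken Identification" else
    if (["did not intend", "no intention", "unintentional", "not deliberate"] : List String).any (fun t => PySem.Str.isIn t s) then some "Lack of Intention" else
    if (["expert report", "expert testimony", "expert witness", "experts", "expert"] : List String).any (fun t => PySem.Str.isIn t s) then some "Expert Evidence" else
    if (["no case to answer", "no evidence offered", "submission of no case"] : List String).any (fun t => PySem.Str.isIn t s) then some "No Case to Answer" else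
    if (["innocent association", "association innocent"] : List String).any (fun t => PySem.Str.isIn t s) then some "Innocent Association" else
    if (["provocation", "victim aggression", "victim initiated"] : List String).any (fun t => PySem.Str.isIn t s) then some "Victim Provocation or Aggression" else
    if (["documentary evidence", "documents submitted", "witness statements", "written records"] : List String).any (fun t => PySem.Str.isIn t s) then some "Documentary Evidence" else
    some x

-- ===== PORT B =====
def pvFlat : List (String × Nat × String) := [
  ("denies", 0, "Offender denies offence"),
  ("denied", 0, "Offender denies offence"),
  ("denial", 0, "Offender denies offence"),
  ("does not admit", 0, "Offender denies offence"),
  ("did not admit", 0, "Offender denies offence"),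
  ("denying", 0, "Offender denies offence"),
  ("alibi", 1, "Offender claims to have alibi"),
  ("elsewhere", 1, "Offender claims to have alibi"),
  ("other location", 1, "Offender claims to have alibi"),
  ("not present", 1, "Offender claims to have alibi"),
  ("no clothing found", 2, "No clothing found matching offender’s"),
  ("no recovery of stolen goods", 3, "No recovery of stolen goods from offender"),
  ("previous ruling", 4, "Previous ruling in another court case"),
  ("previous court case", 4, "Previous ruling in another court case"),
  ("previously acquitted", 4, "Previous ruling in another court case"),
  ("autrefois acquit", 4, "Previous ruling in another court case"),
  ("consistency", 5, "Consistency of offender evidence in court and at police interview"),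
  ("consistent evidence", 5, "Consistency of offender evidence in court and at police interview"),
  ("consistent testimony", 5, "Consistency of offender evidence in court and at police interview"),
  ("previous good character", 6, "Offender of previous good character"),
  ("character references", 6, "Offender of previous good character"),
  ("testimonials", 6, "Offender of previous good character"),
  ("lack of dna", 7, "Lack of DNA evidence to support allegations"),
  ("no dna", 7, "Lack of DNA evidence to support allegations"),
  ("dna evidence not found", 7, "Lack of DNA evidence to support allegations"),
  ("lack of medical", 8, "Lack of medical evidence to support allegations"),
  ("no medical evidence", 8, "Lack of medical evidence to support allegations"),
  ("insufficient medical", 8, "Lack of medical evidence to support allegations"),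
  ("not credible", 9, "Victim is not credible/is unreliable"),
  ("unreliable witness", 9, "Victim is not credible/is unreliable"),
  ("inconsistencies", 9, "Victim is not credible/is unreliable"),
  ("unreliable victim", 9, "Victim is not credible/is unreliable"),
  ("credibility questioned", 9, "Victim is not credible/is unreliable"),
  ("admissibility", 10, "Question admissibility of some item of evidence"),
  ("inadmissible", 10, "Question admissibility of some item of evidence"),
  ("unreliable evidence", 10, "Question admissibility of some item of evidence"),
  ("abuse of process", 10, "Question admissibility of some item of evidence"),
  ("lesser offence", 11, "Offender admits only to lesser offence"),
  ("admits lesser", 11, "Offender admits only to lesser offence"),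
  ("guilty to lesser", 11, "Offender admits only to lesser offence"),
  ("limited role", 11, "Offender admits only to lesser offence"),
  ("less culpable", 11, "Offender admits only to lesser offence"),
  ("co-accused responsible", 12, "Offender states co-accused is responsible for main offence"),
  ("blames co-defendant", 12, "Offender states co-accused is responsible for main offence"),
  ("main offender", 12, "Offender states co-accused is responsible for main offence"),
  ("left scene before", 13, "Offender argues he/she left scene before main offence committed"),
  ("left before", 13, "Offender argues he/she left scene before main offence committed"),
  ("left early", 13, "Offender argues he/she left scene before main offence committed"),
  ("bad character evidence", 14, "Offender uses bad character evidence against co-accused"),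
  ("character evidence against co-accused", 14, "Offender uses bad character evidence against co-accused"),
  ("cut-throat", 15, "Cut-throat defence"),
  ("self-defence", 16, "Self-defence or Justified Action"),
  ("justified action", 16, "Self-defence or Justified Action"),
  ("lawful defence", 16, "Self-defence or Justified Action"),
  ("prevention of crime", 16, "Self-defence or Justified Action"),
  ("lawful excuse", 16, "Self-defence or Justified Action"),
  ("mental health", 17, "Mental Health / Insanity"),
  ("insanity", 17, "Mental Health / Insanity"),
  ("diminished responsibility", 17, "Mental Health / Insanity"),
  ("psychiatric", 17, "Mental Health / Insanity"),
  ("psychological", 17, "Mental Health / Insanity"),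
  ("mistaken identification", 18, "Mistaken Identification"),
  ("misidentified", 18, "Mistaken Identification"),
  ("wrongly identified", 18, "Mistaken Identification"),
  ("did not intend", 19, "Lack of Intention"),
  ("no intention", 19, "Lack of Intention"),
  ("unintentional", 19, "Lack of Intention"),
  ("not deliberate", 19, "Lack of Intention"),
  ("expert report", 20, "Expert Evidence"),
  ("expert testimony", 20, "Expert Evidence"),
  ("expert witness", 20, "Expert Evidence"),
  ("experts", 20, "Expert Evidence"),
  ("expert", 20, "Expert Evidence"),
  ("no case to answer", 21, "No Case to Answer"),
  ("no evidence offered", 21, "No Case to Answer"),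
  ("submission of no case", 21, "No Case to Answer"),
  ("innocent association", 22, "Innocent Association"),
  ("association innocent", 22, "Innocent Association"),
  ("provocation", 23, "Victim Provocation or Aggression"),
  ("victim aggression", 23, "Victim Provocation or Aggression"),
  ("victim initiated", 23, "Victim Provocation or Aggression"),
  ("documentary evidence", 24, "Documentary Evidence"),
  ("documents submitted", 24, "Documentary Evidence"),
  ("witness statements", 24, "Documentary Evidence"),
  ("written records", 24, "Documentary Evidence")]

-- loop body of B's scan: take the entry if its keyword occurs and its priority beats the best so far
def pvStep (s : String) (b : Option (Nat × String)) (t : String × Nat × String) : Option (Nat × String) :=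
  if PySem.Str.isIn t.1 s && (b.elim true (fun p => decide (t.2.1 < p.1))) then some (t.2.1, t.2.2) else b

def categorise_defence_statement_alt (x : Option String) : Option String :=
  match x with
  | none => none
  | some x =>
    let s := PySem.Str.lower (PySem.Str.strip x)
    match pvFlat.foldl (pvStep s) none with
    | some b => some b.2
    | none => some x

-- ===== PRECONDITION & SPEC =====
def Spec_categorise_defence_statement (x : Option String) (out : Option String) : Prop := out = categorise_defence_statement_alt x
instance (x : Option String) (out : Option String) : Decidable (Spec_categorise_defence_statement x out) := by unfold Spec_categorise_defence_statement; infer_instance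

-- ===== CLAIM (what is proved, stated in full; the proofs are below) =====
def Claim_equal_categorise_defence_statement : Prop := ∀ (x : Option String), Dom_categorise_defence_statement x → Spec_categorise_defence_statement x (categorise_defence_statement x)

-- ===== LEMMAS AND PROOFS =====
-- A's rule table, grouped, used only by the proofs as the common reference shape
def pvRules : List (List String × String) := [
  (["denies", "denied", "denial", "does not admit", "did not admit", "denying"], "Offender denies offence"),
  (["alibi", "elsewhere", "other location", "not present"], "Offender claims to have alibi"),
  (["no clothing found"], "No clothing found matching offender’s"),
  (["no recovery of stolen goods"], "No recovery of stolen goods from offender"),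
  (["previous ruling", "previous court case", "previously acquitted", "autrefois acquit"], "Previous ruling in another court case"),
  (["consistency", "consistent evidence", "consistent testimony"], "Consistency of offender evidence in court and at police interview"),
  (["previous good character", "character references", "testimonials"], "Offender of previous good character"),
  (["lack of dna", "no dna", "dna evidence not found"], "Lack of DNA evidence to support allegations"),
  (["lack of medical", "no medical evidence", "insufficient medical"], "Lack of medical evidence to support allegations"),
  (["not credible", "unreliable witness", "inconsistencies", "unreliable victim", "credibility questioned"], "Victim is not credible/is unreliable"),
  (["admissibility", "inadmissible", "unreliable evidence", "abuse of process"], "Question admissibility of some item of evidence"),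
  (["lesser offence", "admits lesser", "guilty to lesser", "limited role", "less culpable"], "Offender admits only to lesser offence"),
  (["co-accused responsible", "blames co-defendant", "main offender"], "Offender states co-accused is responsible for main offence"),
  (["left scene before", "left before", "left early"], "Offender argues he/she left scene before main offence committed"),
  (["bad character evidence", "character evidence against co-accused"], "Offender uses bad character evidence against co-accused"),
  (["cut-throat"], "Cut-throat defence"),
  (["self-defence", "justified action", "lawful defence", "prevention of crime", "lawful excuse"], "Self-defence or Justified Action"),
  (["mental health", "insanity", "diminished responsibility", "psychiatric", "psychological"], "Mental Health / Insanity"),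
  (["mistaken identification", "misidentified", "wrongly identified"], "Mistaken Identification"),
  (["did not intend", "no intention", "unintentional", "not deliberate"], "Lack of Intention"),
  (["expert report", "expert testimony", "expert witness", "experts", "expert"], "Expert Evidence"),
  (["no case to answer", "no evidence offered", "submission of no case"], "No Case to Answer"),
  (["innocent association", "association innocent"], "Innocent Association"),
  (["provocation", "victim aggression", "victim initiated"], "Victim Provocation or Aggression"),
  (["documentary evidence", "documents submitted", "witness statements", "written records"], "Documentary Evidence")]


-- pvFlat is the flattening of pvRules with priorities 0,1,2,…
def pvFlatten (n : Nat) : List (List String × String) → List (String × Nat × String)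
  | [] => []
  | (kws, lab) :: rest => kws.map (fun k => (k, n, lab)) ++ pvFlatten (n+1) rest

theorem pv_flat_eq : pvFlat = pvFlatten 0 pvRules := by decide

theorem pv_prios_ge (n : Nat) (rules : List (List String × String)) :
    ∀ t ∈ pvFlatten n rules, n ≤ t.2.1 := by
  induction rules generalizing n with
  | nil => intro t ht; simp [pvFlatten] at ht
  | cons r rest ih =>
    intro t ht
    obtain ⟨kws, lab⟩ := r
    simp only [pvFlatten, List.mem_append, List.mem_map] at ht
    rcases ht with ⟨k, _, rfl⟩ | ht
    · exact le_refl n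
    · exact Nat.le_of_succ_le (ih (n+1) t ht)

theorem pv_stay (s : String) (p : Nat × String) (l : List (String × Nat × String))
    (h : ∀ t ∈ l, ¬ t.2.1 < p.1) :
    l.foldl (pvStep s) (some p) = some p := by
  induction l with
  | nil => rfl
  | cons t rest ih =>
    have hlt : ¬ t.2.1 < p.1 := h t (by simp)
    have hstep : pvStep s (some p) t = some p := by
      simp [pvStep, hlt]
    rw [List.foldl_cons, hstep]
    exact ih (fun u hu => h u (List.mem_cons_of_mem t hu))

theorem pv_seg (s : String) (kws : List String) (lab : String) (n : Nat) :
    (kws.map (fun k => (k, n, lab))).foldl (pvStep s) none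
      = if kws.any (fun k => PySem.Str.isIn k s) then some (n, lab) else none := by
  induction kws with
  | nil => rfl
  | cons k ks ih =>
    simp only [List.map_cons, List.foldl_cons, List.any_cons]
    by_cases hk : PySem.Str.isIn k s = true
    · have hk2 : PySem.Chars.isIn k.toList s.toList = true := hk
      have hstep : pvStep s none (k, n, lab) = some (n, lab) := by
        simp [pvStep, hk2]
      rw [hstep, pv_stay s (n, lab) _ (by
        intro t ht
        obtain ⟨k', -, rfl⟩ := List.mem_map.1 ht
        simp)]
      simp only [hk, Bool.true_or]
      rfl
    · have hkf : PySem.Str.isIn k s = false := by simpa using hk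
      have hk2 : PySem.Chars.isIn k.toList s.toList = false := hkf
      have hstep : pvStep s none (k, n, lab) = none := by
        simp [pvStep, hk2]
      rw [hstep, ih]
      simp only [hkf, Bool.false_or]

theorem pv_main (s x : String) (rules : List (List String × String)) (n : Nat) :
    (match (pvFlatten n rules).foldl (pvStep s) none with
     | some b => some b.2 | none => some x)
    = (match rules.find? (fun r => r.1.any (fun k => PySem.Str.isIn k s)) with
       | some r => some r.2 | none => some x) := by
  induction rules generalizing n with
  | nil => rfl
  | cons r rest ih =>
    obtain ⟨kws, lab⟩ := r
    simp only [pvFlatten, List.foldl_append, List.find?_cons]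
    rw [pv_seg]
    by_cases h : kws.any (fun k => PySem.Str.isIn k s) = true
    · simp only [h, if_true]
      rw [pv_stay s (n, lab) _ (by
        intro t ht
        have := pv_prios_ge (n+1) rest t ht
        omega)]
    · have hf : kws.any (fun k => PySem.Str.isIn k s) = false := by simpa using h
      simp only [hf, Bool.false_eq_true, if_false]
      exact ih (n+1)

theorem pv_find?_chain (rules : List (List String × String)) (s x : String) :
  (match rules.find? (fun r => r.1.any (fun k => PySem.Str.isIn k s)) with
   | some r => some r.2 | none => some x)
  = rules.foldr (fun r acc => if r.1.any (fun k => PySem.Str.isIn k s) then some r.2 else acc) (some x) := by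
  induction rules with
  | nil => rfl
  | cons r rest ih =>
    simp only [List.find?_cons, List.foldr_cons]
    cases hr : r.1.any (fun k => PySem.Str.isIn k s)
    · rw [if_neg (by simp)]; exact ih
    · rw [if_pos rfl]

-- ===== VERDICT (by name: the statement is the Claim_ definition above) =====
set_option maxHeartbeats 1000000 in
theorem categorise_defence_statement_spec : Claim_equal_categorise_defence_statement := by
  intro x _
  unfold Spec_categorise_defence_statement
  cases x with
  | none => rfl
  | some a =>
    simp only [categorise_defence_statement, categorise_defence_statement_alt]
    rw [pv_flat_eq, pv_main, pv_find?_chain]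
    generalize PySem.Str.lower (PySem.Str.strip a) = s
    simp only [pvRules, List.foldr_cons, List.foldr_nil,
      List.any_cons, List.any_nil, Bool.or_false]
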